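-- pv_equiv track=rewrite | github.com/EdiProdan/color-batch-insert | src/evaluation/algorithms/color_batch_insert.py | _incremental_coloring
-- ===== SOURCE A (Python) =====
-- from collections import defaultdict
-- from typing import List, Dict, Set
--
-- def _incremental_coloring(relationships: List[Dict]) -> Dict[int, int]:
--     """Incrementally color relationships without building full conflict graph"""
--     entity_to_relationships = defaultdict(set)
--     coloring = {}
--
--     for i, rel in enumerate(relationships):
--         # Find all relationships that conflict with current one
--         conflicting_rels = set()
--         for entity in [rel['from'], rel['to']]:
--             conflicting_rels.update(entity_to_relationships[entity])
--
--         # Find forbidden colors from conflicting relationships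
--         forbidden_colors = set()
--         for conflict_rel in conflicting_rels:
--             if conflict_rel in coloring:
--                 forbidden_colors.add(coloring[conflict_rel])
--
--         # Assign first available color
--         color = 0
--         while color in forbidden_colors:
--             color += 1
--
--         coloring[i] = color
--
--         # Update entity tracking
--         entity_to_relationships[rel['from']].add(i)
--         entity_to_relationships[rel['to']].add(i)
--
--     return coloring
-- ===== SOURCE B (Python) =====
-- from typing import List, Dict
--
--
-- def _incremental_coloring(relationships: List[Dict]) -> Dict[int, int]:
--     """Quadratic prefix scan: no entity index at all; the color of edge i is the
--     mex (computed by a sorted scan) of the colors of earlier edges sharing an endpoint."""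
--     coloring = {}
--     endpoints = []
--     for i, rel in enumerate(relationships):
--         f, t = rel['from'], rel['to']
--         used = sorted({coloring[j] for j, (a, b) in enumerate(endpoints)
--                        if a == f or b == f or a == t or b == t})
--         color = 0
--         for c in used:
--             if c == color:
--                 color += 1
--             elif c > color:
--                 break
--         coloring[i] = color
--         endpoints.append((f, t))
--     return coloring
-- ===== Notes on version B (the rewrite author's own statement) =====
-- stated objective: alternative
-- what changed: B keeps no entity-indexed structures at all: it records only the list of endpoint pairs seen so far, recomputes each edge's forbidden colors by one scan over that prefix, and finds the smallest free color by a sort-and-scan mex instead of A's entity->indices dict, coloring lookups and increment-while-member loop.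
import Mathlib
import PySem

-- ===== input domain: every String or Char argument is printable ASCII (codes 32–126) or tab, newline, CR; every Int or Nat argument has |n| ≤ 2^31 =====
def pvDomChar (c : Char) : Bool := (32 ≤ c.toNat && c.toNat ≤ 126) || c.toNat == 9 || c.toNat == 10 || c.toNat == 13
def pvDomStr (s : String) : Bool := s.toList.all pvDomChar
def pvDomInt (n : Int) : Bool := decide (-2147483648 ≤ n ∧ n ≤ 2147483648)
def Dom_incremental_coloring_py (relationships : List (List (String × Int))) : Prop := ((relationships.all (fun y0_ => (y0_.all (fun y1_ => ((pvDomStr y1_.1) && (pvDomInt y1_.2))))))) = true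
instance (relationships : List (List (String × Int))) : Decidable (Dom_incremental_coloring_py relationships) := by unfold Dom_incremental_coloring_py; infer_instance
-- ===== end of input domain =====

-- B drops A's entity->indices dict entirely: a quadratic prefix scan over recorded endpoint pairs plus a sort-and-scan mex; same results (return value; no argument is mutated).


-- ===== PORT A =====
-- A's `color = 0; while color in forbidden: color += 1` loop; fuel `forbidden.length + 1`
-- always suffices (pigeonhole, see `pyFirstFree_exists` below)
def pyFirstFree (forbidden : List Int) (c : Int) : Nat → Int
  | 0 => c
  | fuel + 1 => if c ∈ forbidden then pyFirstFree forbidden (c + 1) fuel else c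

-- one iteration of A's `for i, rel in enumerate(relationships)` body; state = (entity_to_relationships, coloring)
-- (defaultdict reads `entity_to_relationships[e]` are `getD e []`: the entry a read would create is never observed;
--  rel['from'] / rel['to'] are first-match lookups, KeyError excluded by Pre_, `.getD 0` unreachable under it)
def icStepA (st : PySem.Dict Int (PySem.Set Int) × PySem.Dict Int Int)
    (p : Int × List (String × Int)) : PySem.Dict Int (PySem.Set Int) × PySem.Dict Int Int :=
  let etr := st.1
  let coloring := st.2
  let i := p.1
  let f := (List.lookup "from" p.2).getD 0
  let t := (List.lookup "to" p.2).getD 0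
  -- conflicting_rels = set(); then .update with each entity's relationship set
  let conflicting : PySem.Set Int :=
    PySem.Set.update (PySem.Set.update PySem.Set.empty (etr.getD f [])) (etr.getD t [])
  -- forbidden_colors: for each conflicting index present in coloring, add its color
  let forbidden : PySem.Set Int :=
    conflicting.foldl (fun fc j =>
      match coloring.get? j with
      | some c => PySem.Set.add fc c
      | none => fc) PySem.Set.empty
  let color := pyFirstFree forbidden 0 (forbidden.length + 1)
  let coloring := coloring.insert i color
  let etr := etr.insert f (PySem.Set.add (etr.getD f []) i)
  let etr := etr.insert t (PySem.Set.add (etr.getD t []) i)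
  (etr, coloring)

def incremental_coloring_py (relationships : List (List (String × Int))) : List (Int × Int) :=
  (((PySem.List.enumerate relationships).foldl icStepA (PySem.Dict.empty, PySem.Dict.empty)).2).items

-- ===== PORT B =====
-- B's `for c in used: if c == color: color += 1 elif c > color: break` scan
def mexScan : List Int → Int → Int
  | [], color => color
  | c :: rest, color =>
    if c == color then mexScan rest (color + 1)
    else if c > color then color
    else mexScan rest color

-- B's set comprehension `{coloring[j] for j, (a, b) in enumerate(endpoints) if a==f or b==f or a==t or b==t}`
-- (coloring[j] never raises: every j < i is colored, so the `.getD 0` default is unreachable — exact here)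
def usedColors (endpoints : List (Int × Int)) (coloring : PySem.Dict Int Int) (f t : Int) : PySem.Set Int :=
  (PySem.List.enumerate endpoints).foldl
    (fun s p => if p.2.1 == f || p.2.2 == f || p.2.1 == t || p.2.2 == t
                then PySem.Set.add s ((coloring.get? p.1).getD 0) else s)
    PySem.Set.empty

-- B's loop as structural recursion; state = (endpoints so far, coloring); i is the enumerate counter
def icGoB (rels : List (List (String × Int))) (i : Int)
    (endpoints : List (Int × Int)) (coloring : PySem.Dict Int Int) : PySem.Dict Int Int :=
  match rels with
  | [] => coloring
  | rel :: rest =>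
    let f := (List.lookup "from" rel).getD 0
    let t := (List.lookup "to" rel).getD 0
    let used := PySem.List.sorted (usedColors endpoints coloring f t) (fun x => x) false
    let color := mexScan used 0
    icGoB rest (i + 1) (endpoints ++ [(f, t)]) (coloring.insert i color)

def incremental_coloring_py_alt (relationships : List (List (String × Int))) : List (Int × Int) :=
  (icGoB relationships 0 [] PySem.Dict.empty).items

-- ===== PRECONDITION & SPEC =====
-- Pre_ excludes exactly the inputs where rel['from'] or rel['to'] raises KeyError in both Pythons.
def Pre_incremental_coloring_py (relationships : List (List (String × Int))) : Prop :=
  ∀ rel ∈ relationships, "from" ∈ rel.map Prod.fst ∧ "to" ∈ rel.map Prod.fst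

instance (relationships : List (List (String × Int))) : Decidable (Pre_incremental_coloring_py relationships) := by
  unfold Pre_incremental_coloring_py; infer_instance

def pvWitness_incremental_coloring_py : (List (List (String × Int))) :=
  [[("from", 1), ("to", 2)], [("from", 2), ("to", 1)]]

def Spec_incremental_coloring_py (relationships : List (List (String × Int))) (out : List (Int × Int)) : Prop := out = incremental_coloring_py_alt relationships
instance (relationships : List (List (String × Int))) (out : List (Int × Int)) : Decidable (Spec_incremental_coloring_py relationships out) := by unfold Spec_incremental_coloring_py; infer_instance

-- ===== CLAIM (what is proved, stated in full; the proofs are below) =====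
def Claim_equal_incremental_coloring_py : Prop := ∀ (relationships : List (List (String × Int))), Dom_incremental_coloring_py relationships → Pre_incremental_coloring_py relationships → Spec_incremental_coloring_py relationships (incremental_coloring_py relationships)

-- ===== LEMMAS AND PROOFS =====

-- A's while loop returns the least value ≥ c not in `forbidden`, given enough fuel
lemma pyFirstFree_spec (f : List Int) : ∀ (fuel : Nat) (c : Int),
    (∃ k : Int, c ≤ k ∧ k < c + fuel ∧ k ∉ f) →
    pyFirstFree f c fuel ∉ f ∧ c ≤ pyFirstFree f c fuel ∧
      ∀ m, c ≤ m → m < pyFirstFree f c fuel → m ∈ f := by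
  intro fuel
  induction fuel with
  | zero => rintro c ⟨k, hk1, hk2, _⟩; omega
  | succ n ih =>
    rintro c ⟨k, hk1, hk2, hk3⟩
    simp only [pyFirstFree]
    by_cases hc : c ∈ f
    · rw [if_pos hc]
      have hkc : c + 1 ≤ k := by
        rcases lt_or_eq_of_le hk1 with h | h
        · omega
        · exact absurd hc (h ▸ hk3)
      obtain ⟨h1, h2, h3⟩ := ih (c + 1) ⟨k, hkc, by omega, hk3⟩
      refine ⟨h1, by omega, ?_⟩
      intro m hm1 hm2
      rcases eq_or_lt_of_le hm1 with h | h
      · exact h ▸ hc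
      · exact h3 m (by omega) hm2
    · rw [if_neg hc]
      exact ⟨hc, le_refl c, by intro m h1 h2; omega⟩

-- pigeonhole: among 0 .. f.length there is a value not in f
lemma pyFirstFree_exists (f : List Int) :
    ∃ k : Int, 0 ≤ k ∧ k < 0 + (f.length + 1 : Nat) ∧ k ∉ f := by
  by_contra h
  push Not at h
  have hsub : PySem.List.pyRange 0 ((f.length + 1 : Nat) : Int) 1 ⊆ f := by
    intro x hx
    rw [PySem.List.mem_pyRange_one] at hx
    exact h x hx.1 (by push_cast at hx ⊢; omega)
  have hnd := PySem.List.nodup_pyRange_one (a := 0) (b := ((f.length + 1 : Nat) : Int))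
  have hlen : (PySem.List.pyRange 0 ((f.length + 1 : Nat) : Int) 1).length ≤ f.length := by
    calc (PySem.List.pyRange 0 ((f.length + 1 : Nat) : Int) 1).length
        = (PySem.List.pyRange 0 ((f.length + 1 : Nat) : Int) 1).toFinset.card :=
          (List.toFinset_card_of_nodup hnd).symm
      _ ≤ f.toFinset.card := Finset.card_le_card (by intro x hx; simp only [List.mem_toFinset] at hx ⊢; exact hsub hx)
      _ ≤ f.length := f.toFinset_card_le
  rw [PySem.List.length_pyRange_one] at hlen
  omega

-- B's sorted scan returns the least value ≥ c not in the (strictly sorted, ≥ c) list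
lemma mexScan_spec : ∀ (l : List Int) (c : Int), l.Pairwise (· < ·) → (∀ x ∈ l, c ≤ x) →
    mexScan l c ∉ l ∧ c ≤ mexScan l c ∧ ∀ m, c ≤ m → m < mexScan l c → m ∈ l := by
  intro l
  induction l with
  | nil => intro c _ _; exact ⟨by simp, le_refl c, by intro m h1 h2; simp only [mexScan] at h2; omega⟩
  | cons a rest ih =>
    intro c hp hge
    have hrest : ∀ x ∈ rest, a < x := (List.pairwise_cons.mp hp).1
    have hac : c ≤ a := hge a (List.mem_cons_self)
    simp only [mexScan]
    by_cases hae : a = c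
    · subst hae
      rw [if_pos (by simp)]
      obtain ⟨h1, h2, h3⟩ := ih (a + 1) (List.pairwise_cons.mp hp).2
        (fun x hx => by have := hrest x hx; omega)
      refine ⟨?_, by omega, ?_⟩
      · intro hmem
        rcases List.mem_cons.mp hmem with h | h
        · omega
        · exact h1 h
      · intro m hm1 hm2
        rcases eq_or_lt_of_le hm1 with h | h
        · exact h ▸ List.mem_cons_self
        · exact List.mem_cons_of_mem a (h3 m (by omega) hm2)
    · have hgt : a > c := by omega
      rw [if_neg (by simpa using hae), if_pos (by simpa using hgt)]
      refine ⟨?_, le_refl c, by intro m h1 h2; omega⟩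
      intro hmem
      rcases List.mem_cons.mp hmem with h | h
      · omega
      · have := hrest c h; omega

-- two "least ≥ 0 not in" values over lists with the same members coincide
lemma mex_eq_firstFree (f used : List Int) (hmem : ∀ x : Int, x ∈ used ↔ x ∈ f)
    (hp : used.Pairwise (· < ·)) (hnn : ∀ x ∈ used, (0 : Int) ≤ x) :
    mexScan used 0 = pyFirstFree f 0 (f.length + 1) := by
  obtain ⟨hb1, hb2, hb3⟩ := mexScan_spec used 0 hp hnn
  obtain ⟨ha1, ha2, ha3⟩ := pyFirstFree_spec f (f.length + 1) 0 (pyFirstFree_exists f)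
  rcases lt_trichotomy (mexScan used 0) (pyFirstFree f 0 (f.length + 1)) with h1 | h1 | h1
  · exact absurd ((hmem _).mpr (ha3 _ hb2 h1)) hb1
  · exact h1
  · exact absurd ((hmem _).mp (hb3 _ ha2 h1)) ha1

-- membership in A's forbidden-color fold
lemma mem_forbidden_fold (col : PySem.Dict Int Int) :
    ∀ (l : List Int) (s : List Int) (x : Int),
    x ∈ l.foldl (fun fc j =>
      match col.get? j with
      | some c => PySem.Set.add fc c
      | none => fc) s ↔ x ∈ s ∨ ∃ j ∈ l, col.get? j = some x := by
  intro l
  induction l with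
  | nil => simp
  | cons a l ih =>
    intro s x
    simp only [List.foldl_cons, List.mem_cons]
    cases hga : col.get? a with
    | none =>
      rw [ih]
      constructor
      · rintro (h | ⟨j, hj, hcj⟩)
        · exact Or.inl h
        · exact Or.inr ⟨j, Or.inr hj, hcj⟩
      · rintro (h | ⟨j, hj | hj, hcj⟩)
        · exact Or.inl h
        · subst hj; rw [hga] at hcj; cases hcj
        · exact Or.inr ⟨j, hj, hcj⟩
    | some c =>
      rw [ih]
      simp only [PySem.Set.mem_add]
      constructor
      · rintro ((h | h) | ⟨j, hj, hcj⟩)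
        · exact Or.inl h
        · exact Or.inr ⟨a, Or.inl rfl, h ▸ hga⟩
        · exact Or.inr ⟨j, Or.inr hj, hcj⟩
      · rintro (h | ⟨j, hj | hj, hcj⟩)
        · exact Or.inl (Or.inl h)
        · subst hj; rw [hga] at hcj
          exact Or.inl (Or.inr (by injection hcj with h; omega))
        · exact Or.inr ⟨j, hj, hcj⟩

-- membership in B's set-comprehension fold (generic start)
lemma mem_used_fold (col : PySem.Dict Int Int) (f t : Int) :
    ∀ (l : List (Int × (Int × Int))) (s : PySem.Set Int) (x : Int),
    x ∈ l.foldl (fun s p => if p.2.1 == f || p.2.2 == f || p.2.1 == t || p.2.2 == t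
        then PySem.Set.add s ((col.get? p.1).getD 0) else s) s
      ↔ x ∈ s ∨ ∃ p ∈ l, (p.2.1 = f ∨ p.2.2 = f ∨ p.2.1 = t ∨ p.2.2 = t) ∧ (col.get? p.1).getD 0 = x := by
  intro l
  induction l with
  | nil => simp
  | cons a l ih =>
    intro s x
    simp only [List.foldl_cons]
    by_cases hc : a.2.1 = f ∨ a.2.2 = f ∨ a.2.1 = t ∨ a.2.2 = t
    · rw [if_pos (by simp only [Bool.or_eq_true, beq_iff_eq]; tauto), ih]
      simp only [PySem.Set.mem_add, List.mem_cons]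
      constructor
      · rintro ((h | h) | ⟨p, hp, hcp, hxp⟩)
        · exact Or.inl h
        · exact Or.inr ⟨a, Or.inl rfl, hc, h.symm⟩
        · exact Or.inr ⟨p, Or.inr hp, hcp, hxp⟩
      · rintro (h | ⟨p, hp | hp, hcp, hxp⟩)
        · exact Or.inl (Or.inl h)
        · subst hp; exact Or.inl (Or.inr hxp.symm)
        · exact Or.inr ⟨p, hp, hcp, hxp⟩
    · rw [if_neg (by simp only [Bool.or_eq_true, beq_iff_eq]; tauto), ih]
      simp only [List.mem_cons]
      constructor
      · rintro (h | ⟨p, hp, hcp, hxp⟩)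
        · exact Or.inl h
        · exact Or.inr ⟨p, Or.inr hp, hcp, hxp⟩
      · rintro (h | ⟨p, hp | hp, hcp, hxp⟩)
        · exact Or.inl h
        · subst hp; exact absurd hcp hc
        · exact Or.inr ⟨p, hp, hcp, hxp⟩

-- B's set comprehension builds a duplicate-free list
lemma nodup_used_fold (col : PySem.Dict Int Int) (f t : Int) :
    ∀ (l : List (Int × (Int × Int))) (s : PySem.Set Int), s.Nodup →
    (l.foldl (fun s p => if p.2.1 == f || p.2.2 == f || p.2.1 == t || p.2.2 == t
        then PySem.Set.add s ((col.get? p.1).getD 0) else s) s).Nodup := by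
  intro l
  induction l with
  | nil => intro s hs; exact hs
  | cons a l ih =>
    intro s hs
    simp only [List.foldl_cons]
    split_ifs
    · exact ih _ (PySem.Set.nodup_add _ _ hs)
    · exact ih _ hs

-- sorted of a duplicate-free Int list is strictly increasing
lemma sorted_strict_of_nodup (l : List Int) (h : l.Nodup) :
    (PySem.List.sorted l (fun x => x) false).Pairwise (· < ·) := by
  have hle := PySem.List.sorted_pairwise (xs := l) (key := fun x => x)
  have hperm : (PySem.List.sorted l (fun x => x) false).Perm l := PySem.List.sorted_perm l (fun x => x) false
  have hnd : (PySem.List.sorted l (fun x => x) false).Nodup := hperm.nodup_iff.mpr h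
  exact (hle.and hnd).imp (fun {a b} hab => lt_of_le_of_ne hab.1 hab.2)

-- membership after A's two entity-tracking inserts
lemma mem_etr2 (etr : PySem.Dict Int (PySem.Set Int)) (f t i e j : Int) :
    j ∈ (((etr.insert f (PySem.Set.add (etr.getD f []) i)).insert t
      (PySem.Set.add ((etr.insert f (PySem.Set.add (etr.getD f []) i)).getD t []) i)).getD e []) ↔
    j ∈ etr.getD e [] ∨ ((e = f ∨ e = t) ∧ j = i) := by
  simp only [PySem.Dict.getD_insert]
  split_ifs <;> simp_all [PySem.Set.mem_add]

-- the main simulation invariant: A's (entity->indices, coloring) state versus B's (endpoints, coloring) state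
lemma ic_main : ∀ (rels : List (List (String × Int))) (i : Int)
    (etr : PySem.Dict Int (PySem.Set Int)) (col : PySem.Dict Int Int)
    (endpoints : List (Int × Int)),
    i = (endpoints.length : Int) →
    (∀ j : Int, (col.get? j).isSome ↔ 0 ≤ j ∧ j < i) →
    (∀ j c : Int, col.get? j = some c → 0 ≤ c) →
    (∀ e j : Int, j ∈ etr.getD e [] ↔
      ∃ p ∈ PySem.List.enumerate endpoints 0, p.1 = j ∧ (p.2.1 = e ∨ p.2.2 = e)) →
    ((PySem.List.enumerate rels i).foldl icStepA (etr, col)).2 = icGoB rels i endpoints col := by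
  intro rels
  induction rels with
  | nil => intros; rfl
  | cons rel rest ih =>
    intro i etr col endpoints hlen hsome hnn hm
    set f := (List.lookup "from" rel).getD (0 : Int) with hfdef
    set t := (List.lookup "to" rel).getD (0 : Int) with htdef
    set conflicting : PySem.Set Int :=
      PySem.Set.update (PySem.Set.update PySem.Set.empty (etr.getD f [])) (etr.getD t []) with hconf
    set forbA : PySem.Set Int :=
      conflicting.foldl (fun fc j =>
        match col.get? j with
        | some c => PySem.Set.add fc c
        | none => fc) PySem.Set.empty with hforbA
    set usedS : PySem.Set Int := usedColors endpoints col f t with husedS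
    set used : List Int := PySem.List.sorted usedS (fun x => x) false with husedDef
    set cA := pyFirstFree forbA 0 (forbA.length + 1) with hcA
    set cB := mexScan used 0 with hcB
    set etr2 := (etr.insert f (PySem.Set.add (etr.getD f []) i)).insert t
      (PySem.Set.add ((etr.insert f (PySem.Set.add (etr.getD f []) i)).getD t []) i) with hetr2def
    -- every index recorded in `endpoints` is colored and in [0, i)
    have hpidx : ∀ p ∈ PySem.List.enumerate endpoints 0, 0 ≤ p.1 ∧ p.1 < i := by
      intro p hp
      obtain ⟨k, hk, rfl⟩ := (PySem.List.mem_enumerate_iff _ _ _).mp hp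
      rw [hlen]
      constructor
      · show (0 : Int) ≤ 0 + (k : Int); omega
      · show (0 : Int) + (k : Int) < (endpoints.length : Int); omega
    -- the forbidden set and the used-colors set have the same members
    have husedMem : ∀ x : Int, x ∈ usedS ↔
        ∃ p ∈ PySem.List.enumerate endpoints 0,
          (p.2.1 = f ∨ p.2.2 = f ∨ p.2.1 = t ∨ p.2.2 = t) ∧ col.get? p.1 = some x := by
      intro x
      rw [husedS]
      unfold usedColors
      rw [mem_used_fold]
      constructor
      · rintro (h | ⟨p, hp, hcp, hxp⟩)
        · exact absurd h (by simp [PySem.Set.empty])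
        · obtain ⟨c, hc⟩ := Option.isSome_iff_exists.mp ((hsome p.1).mpr (hpidx p hp))
          refine ⟨p, hp, hcp, ?_⟩
          rw [hc]; rw [hc] at hxp; simpa using hxp
      · rintro ⟨p, hp, hcp, hxp⟩
        exact Or.inr ⟨p, hp, hcp, by rw [hxp]; rfl⟩
    have hforbMem : ∀ x : Int, x ∈ forbA ↔
        ∃ j : Int, (j ∈ etr.getD f [] ∨ j ∈ etr.getD t []) ∧ col.get? j = some x := by
      intro x
      rw [hforbA, mem_forbidden_fold]
      constructor
      · rintro (h | ⟨j, hj, hcj⟩)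
        · exact absurd h (by simp [PySem.Set.empty])
        · rw [hconf, PySem.Set.mem_update, PySem.Set.mem_update] at hj
          rcases hj with (h0 | h1) | h2
          · exact absurd h0 (by simp [PySem.Set.empty])
          · exact ⟨j, Or.inl h1, hcj⟩
          · exact ⟨j, Or.inr h2, hcj⟩
      · rintro ⟨j, hj | hj, hcj⟩
        · exact Or.inr ⟨j, by
            rw [hconf, PySem.Set.mem_update, PySem.Set.mem_update]
            exact Or.inl (Or.inr hj), hcj⟩
        · exact Or.inr ⟨j, by
            rw [hconf, PySem.Set.mem_update]
            exact Or.inr hj, hcj⟩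
    have hmemEq : ∀ x : Int, x ∈ usedS ↔ x ∈ forbA := by
      intro x
      rw [husedMem, hforbMem]
      constructor
      · rintro ⟨p, hp, hcp, hxp⟩
        refine ⟨p.1, ?_, hxp⟩
        rcases hcp with h | h | h | h
        · exact Or.inl ((hm f p.1).mpr ⟨p, hp, rfl, Or.inl h⟩)
        · exact Or.inl ((hm f p.1).mpr ⟨p, hp, rfl, Or.inr h⟩)
        · exact Or.inr ((hm t p.1).mpr ⟨p, hp, rfl, Or.inl h⟩)
        · exact Or.inr ((hm t p.1).mpr ⟨p, hp, rfl, Or.inr h⟩)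
      · rintro ⟨j, hj | hj, hcj⟩
        · obtain ⟨p, hp, hpj, hpe⟩ := (hm f j).mp hj
          exact ⟨p, hp, by tauto, hpj ▸ hcj⟩
        · obtain ⟨p, hp, hpj, hpe⟩ := (hm t j).mp hj
          exact ⟨p, hp, by tauto, hpj ▸ hcj⟩
    -- sorted(usedS) is strictly increasing, nonnegative, with forbA's members
    have hnodupS : usedS.Nodup := by
      rw [husedS]; unfold usedColors
      exact nodup_used_fold col f t _ PySem.Set.empty List.nodup_nil
    have hstrict : used.Pairwise (· < ·) := husedDef ▸ sorted_strict_of_nodup usedS hnodupS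
    have husedIff : ∀ x : Int, x ∈ used ↔ x ∈ forbA := by
      intro x
      rw [husedDef, PySem.List.mem_sorted]
      exact hmemEq x
    have hnnUsed : ∀ x ∈ used, (0 : Int) ≤ x := by
      intro x hx
      rw [husedDef, PySem.List.mem_sorted, husedMem] at hx
      obtain ⟨p, _, _, hxp⟩ := hx
      exact hnn p.1 x hxp
    have hcolor : cB = cA := by
      rw [hcB, hcA]
      exact mex_eq_firstFree forbA used husedIff hstrict hnnUsed
    have hcBnn : (0 : Int) ≤ cB := (mexScan_spec used 0 hstrict hnnUsed).2.1
    -- one unfolded step of each port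
    have stepEq : icStepA (etr, col) (i, rel) = (etr2, col.insert i cA) := rfl
    have goEq : icGoB (rel :: rest) i endpoints col =
        icGoB rest (i + 1) (endpoints ++ [(f, t)]) (col.insert i cB) := rfl
    -- updated invariants
    have hi0 : 0 ≤ i := by rw [hlen]; omega
    have hlen' : i + 1 = ((endpoints ++ [(f, t)]).length : Int) := by
      simp [List.length_append]; omega
    have hsome' : ∀ j : Int, ((col.insert i cB).get? j).isSome ↔ 0 ≤ j ∧ j < i + 1 := by
      intro j
      rw [PySem.Dict.get?_insert]
      split_ifs with h
      · subst h; simp; omega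
      · rw [hsome j]; omega
    have hnn' : ∀ j c : Int, (col.insert i cB).get? j = some c → 0 ≤ c := by
      intro j c hj
      rw [PySem.Dict.get?_insert] at hj
      split_ifs at hj with h
      · injection hj with h'; omega
      · exact hnn j c hj
    have hetr2 : ∀ e j : Int, j ∈ etr2.getD e [] ↔
        j ∈ etr.getD e [] ∨ ((e = f ∨ e = t) ∧ j = i) := fun e j => hetr2def ▸ mem_etr2 etr f t i e j
    have hm' : ∀ e j : Int, j ∈ etr2.getD e [] ↔
        ∃ p ∈ PySem.List.enumerate (endpoints ++ [(f, t)]) 0, p.1 = j ∧ (p.2.1 = e ∨ p.2.2 = e) := by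
      intro e j
      have happ : PySem.List.enumerate (endpoints ++ [(f, t)]) 0 =
          PySem.List.enumerate endpoints 0 ++ [((endpoints.length : Int), (f, t))] := by
        rw [PySem.List.enumerate_append]
        simp [PySem.List.enumerate_cons, PySem.List.enumerate_nil]
      rw [hetr2 e j, happ]
      constructor
      · rintro (h | ⟨hef, rfl⟩)
        · obtain ⟨p, hp, hpj, hpe⟩ := (hm e j).mp h
          exact ⟨p, List.mem_append_left _ hp, hpj, hpe⟩
        · refine ⟨((endpoints.length : Int), (f, t)), List.mem_append_right _ (by simp), ?_, ?_⟩
          · simpa using hlen.symm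
          · simpa using hef.imp Eq.symm Eq.symm
      · rintro ⟨p, hp, hpj, hpe⟩
        rcases List.mem_append.mp hp with hp' | hp'
        · exact Or.inl ((hm e j).mpr ⟨p, hp', hpj, hpe⟩)
        · have hpv : p = ((endpoints.length : Int), (f, t)) := by simpa using hp'
          subst hpv
          refine Or.inr ⟨?_, by rw [← hpj, hlen]⟩
          simpa using hpe.imp Eq.symm Eq.symm
    rw [PySem.List.enumerate_cons, List.foldl_cons, stepEq, goEq, ← hcolor]
    exact ih (i + 1) etr2 (col.insert i cB) (endpoints ++ [(f, t)]) hlen' hsome' hnn' hm'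

-- ===== VERDICT (by name: the statement is the Claim_ definition above) =====
theorem incremental_coloring_py_spec : Claim_equal_incremental_coloring_py := by
  intro rels _ _
  unfold Spec_incremental_coloring_py incremental_coloring_py incremental_coloring_py_alt
  rw [ic_main rels 0 PySem.Dict.empty PySem.Dict.empty []]
  · rfl
  · intro j; simp [PySem.Dict.get?_empty]
  · intro j c hj; simp [PySem.Dict.get?_empty] at hj
  · intro e j; simp [PySem.Dict.getD_empty, PySem.List.enumerate_nil]
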